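-- pv_equiv track=rewrite | github.com/ki-ba/advent-of-code-2025 | day_02/solution.py | is_repeating
-- ===== SOURCE A (Python) =====
-- def is_repeating(number, section_len):
--     istr = str(number)
--     for n_section in range(1, (len(istr) // section_len)):
--         first = istr[0:section_len]
--         current = istr[n_section * section_len:(n_section + 1) * (section_len)]
--         if current != first:
--             return False
--         elif (n_section == (len(istr) // section_len) - 1):
--             return True
-- ===== SOURCE B (Python) =====
-- def is_repeating(number, section_len):
--     istr = str(number)
--     q = len(istr) // section_len
--     if q <= 1:
--         return None
--     first = istr[:section_len]
--     return istr[:q * section_len] == first * q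
-- ===== Notes on version B (the rewrite author's own statement) =====
-- stated objective: idiomatic
-- what changed: Replaces the section-by-section loop with early returns by one comparison of the sliced prefix against the first section repeated q times.
import Mathlib
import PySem

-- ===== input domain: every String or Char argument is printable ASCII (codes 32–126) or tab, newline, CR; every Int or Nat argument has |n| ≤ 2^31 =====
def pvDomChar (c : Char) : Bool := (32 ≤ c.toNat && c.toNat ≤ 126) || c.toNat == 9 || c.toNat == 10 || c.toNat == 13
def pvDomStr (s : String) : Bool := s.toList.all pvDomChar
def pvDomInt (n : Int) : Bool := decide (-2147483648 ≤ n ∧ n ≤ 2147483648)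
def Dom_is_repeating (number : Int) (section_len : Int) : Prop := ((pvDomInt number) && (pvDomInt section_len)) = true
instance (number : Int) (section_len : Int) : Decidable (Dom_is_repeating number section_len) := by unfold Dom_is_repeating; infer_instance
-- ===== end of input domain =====

-- B replaces A's section-by-section loop by one comparison of the sliced prefix with the
-- first section repeated q times (idiomatic single string equality; same cost).

-- ===== PORT A =====
-- loop body of A: for n_section in range(1, len(istr)//section_len): ... with early returns
def isRepeatLoopA (istr : List Char) (section_len : Int) : List Int → Option Bool
  | [] => none
  | n_section :: rest =>
    let first := PySem.List.slice istr (some 0) (some section_len)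
    let current := PySem.List.slice istr (some (n_section * section_len))
                     (some ((n_section + 1) * section_len))
    if current ≠ first then some false
    else if n_section = PySem.Int.floordiv (PySem.Chars.len istr) section_len - 1 then some true
    else isRepeatLoopA istr section_len rest

def is_repeating (number : Int) (section_len : Int) : Option Bool :=
  let istr := PySem.Int.toChars number
  isRepeatLoopA istr section_len
    (PySem.List.pyRange 1 (PySem.Int.floordiv (PySem.Chars.len istr) section_len) 1)

-- ===== PORT B =====
def is_repeating_alt (number : Int) (section_len : Int) : Option Bool :=
  let istr := PySem.Int.toChars number
  let q := PySem.Int.floordiv (PySem.Chars.len istr) section_len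
  if q ≤ 1 then none
  else
    let first := PySem.List.slice istr none (some section_len)
    some (decide (PySem.List.slice istr none (some (q * section_len)) = PySem.List.pyRepeat first q))

-- ===== PRECONDITION & SPEC =====
-- Pre_ excludes only section_len = 0, where Python's '//' raises ZeroDivisionError in both programs.
def Pre_is_repeating (number : Int) (section_len : Int) : Prop := section_len ≠ 0
instance (number : Int) (section_len : Int) : Decidable (Pre_is_repeating number section_len) := by
  unfold Pre_is_repeating; infer_instance

def pvWitness_is_repeating : Int × Int := (1212, 2)

def Spec_is_repeating (number : Int) (section_len : Int) (out : Option Bool) : Prop :=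
  out = is_repeating_alt number section_len
instance (number : Int) (section_len : Int) (out : Option Bool) : Decidable (Spec_is_repeating number section_len out) := by
  unfold Spec_is_repeating; infer_instance

-- ===== CLAIM (what is proved, stated in full; the proofs are below) =====
def Claim_equal_is_repeating : Prop := ∀ (number : Int) (section_len : Int), Dom_is_repeating number section_len → Pre_is_repeating number section_len → Spec_is_repeating number section_len (is_repeating number section_len)

-- ===== LEMMAS AND PROOFS =====

-- prefix-of-repeats characterisation, on Nat indices
theorem take_mul_eq_flatten_replicate_iff (s : ℕ) :
    ∀ (q : ℕ) (L f : List Char), f.length = s → q * s ≤ L.length →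
      (L.take (q * s) = (List.replicate q f).flatten ↔
        ∀ k < q, (L.drop (k * s)).take s = f) := by
  intro q
  induction q with
  | zero => intro L f _ _; simp
  | succ q ih =>
    intro L f hf hlen
    have hlen' : q * s ≤ (L.drop s).length := by
      simp [List.length_drop]
      have : (q + 1) * s = q * s + s := by ring
      omega
    have hs_le : s ≤ L.length := by nlinarith
    have htake : L.take ((q + 1) * s) = L.take s ++ (L.drop s).take (q * s) := by
      have : (q + 1) * s = s + q * s := by ring
      rw [this, List.take_add]
    have hflat : (List.replicate (q + 1) f).flatten = f ++ (List.replicate q f).flatten := by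
      simp [List.replicate_succ]
    rw [htake, hflat]
    have hlentake : (L.take s).length = s := by simp [List.length_take]; omega
    constructor
    · intro h k hk
      obtain ⟨h1, h2⟩ := List.append_inj h (by rw [hlentake, hf])
      cases k with
      | zero => simpa using h1
      | succ k =>
        have hk' : k < q := by omega
        have hd : (L.drop s).drop (k * s) = L.drop ((k + 1) * s) := by
          rw [List.drop_drop]; congr 1; ring
        have := ((ih (L.drop s) f hf hlen').mp h2) k hk'
        rwa [hd] at this
    · intro h
      have h0 : L.take s = f := by simpa using h 0 (by omega)
      have hrest : (L.drop s).take (q * s) = (List.replicate q f).flatten := by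
        refine (ih (L.drop s) f hf hlen').mpr ?_
        intro k hk
        have hd : (L.drop s).drop (k * s) = L.drop ((k + 1) * s) := by
          rw [List.drop_drop]; congr 1; ring
        rw [hd]
        exact h (k + 1) (by omega)
      rw [h0, hrest]

-- A's loop, over the tail of the range, computes "all remaining sections equal the first"
theorem isRepeatLoopA_eq (istr : List Char) (s : Int) (_hs : 0 < s) :
    ∀ (m : ℕ) (k : Int), 1 ≤ k →
      k + m = PySem.Int.floordiv (PySem.Chars.len istr) s - 1 →
      isRepeatLoopA istr s (PySem.List.pyRange k (PySem.Int.floordiv (PySem.Chars.len istr) s) 1) =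
        some (decide (∀ n : Int, k ≤ n → n < PySem.Int.floordiv (PySem.Chars.len istr) s →
          PySem.List.slice istr (some (n * s)) (some ((n + 1) * s)) =
            PySem.List.slice istr (some 0) (some s))) := by
  intro m
  induction m with
  | zero =>
    intro k hk1 hkq
    have hkq' : k = PySem.Int.floordiv (PySem.Chars.len istr) s - 1 := by omega
    rw [PySem.List.pyRange_one_cons (by omega), PySem.List.pyRange_one_eq_nil (by omega)]
    simp only [isRepeatLoopA]
    by_cases hcur : PySem.List.slice istr (some (k * s)) (some ((k + 1) * s)) =
        PySem.List.slice istr (some 0) (some s)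
    · simp only [hcur, ne_eq, not_true_eq_false, if_false, if_pos hkq']
      congr 1
      symm
      rw [decide_eq_true_eq]
      intro n hn1 hn2
      have : n = k := by omega
      rwa [this]
    · simp only [ne_eq, hcur, not_false_eq_true, if_true]
      congr 1
      symm
      rw [decide_eq_false_iff_not]
      intro hall
      exact hcur (hall k le_rfl (by omega))
  | succ m ih =>
    intro k hk1 hkq
    rw [PySem.List.pyRange_one_cons (by omega)]
    simp only [isRepeatLoopA]
    by_cases hcur : PySem.List.slice istr (some (k * s)) (some ((k + 1) * s)) =
        PySem.List.slice istr (some 0) (some s)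
    · have hne : k ≠ PySem.Int.floordiv (PySem.Chars.len istr) s - 1 := by omega
      simp only [hcur, ne_eq, not_true_eq_false, if_false, if_neg hne]
      rw [ih (k + 1) (by omega) (by omega)]
      congr 1
      simp only [decide_eq_decide]
      constructor
      · intro hall n hn1 hn2
        rcases eq_or_lt_of_le hn1 with h | h
        · rwa [← h]
        · exact hall n (by omega) hn2
      · intro hall n hn1 hn2
        exact hall n (by omega) hn2
    · simp only [ne_eq, hcur, not_false_eq_true, if_true]
      congr 1
      symm
      rw [decide_eq_false_iff_not]
      intro hall
      exact hcur (hall k le_rfl (by omega))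

-- a nonnegative-index section slice is drop/take
theorem slice_section (L : List Char) (s n : Int) (hs : 0 < s) (hn : 0 ≤ n) :
    PySem.List.slice L (some (n * s)) (some ((n + 1) * s)) =
      (L.drop (n * s).toNat).take s.toNat := by
  have e1 : (n + 1) * s = n * s + s := by ring
  have h2 : 0 ≤ n * s := by positivity
  rw [e1, PySem.List.slice_toNat L (by positivity) (by positivity)]
  congr 1
  omega

theorem is_repeating_eq_alt (number : Int) (section_len : Int) (hpre : section_len ≠ 0) :
    is_repeating number section_len = is_repeating_alt number section_len := by
  show isRepeatLoopA (PySem.Int.toChars number) section_len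
      (PySem.List.pyRange 1
        (PySem.Int.floordiv (PySem.Chars.len (PySem.Int.toChars number)) section_len) 1) =
    if PySem.Int.floordiv (PySem.Chars.len (PySem.Int.toChars number)) section_len ≤ 1 then none
    else some (decide (PySem.List.slice (PySem.Int.toChars number) none
        (some (PySem.Int.floordiv (PySem.Chars.len (PySem.Int.toChars number)) section_len * section_len)) =
      PySem.List.pyRepeat (PySem.List.slice (PySem.Int.toChars number) none (some section_len))
        (PySem.Int.floordiv (PySem.Chars.len (PySem.Int.toChars number)) section_len)))
  set L := PySem.Int.toChars number with hL
  set q := PySem.Int.floordiv (PySem.Chars.len L) section_len with hq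
  have hlen : PySem.Chars.len L = (L.length : Int) := PySem.Chars.len_eq L
  have hqN : q = PySem.Int.floordiv ((L.length : Int)) section_len := by rw [hq, hlen]
  have hfm := PySem.Int.floordiv_mul_add_mod ((L.length : Int)) section_len
  by_cases hq1 : q ≤ 1
  · rw [PySem.List.pyRange_one_eq_nil hq1]
    simp [isRepeatLoopA, if_pos hq1]
  · rw [not_le] at hq1
    -- section_len must be positive: a negative divisor gives q ≤ 0
    have hs : 0 < section_len := by
      rcases lt_trichotomy section_len 0 with h | h | h
      · exfalso
        have hmb := PySem.Int.mod_neg_bounds ((L.length : Int)) h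
        have hnn : (0 : Int) ≤ (L.length : Int) := by positivity
        rw [← hqN] at hfm
        nlinarith [mul_nonneg (by omega : (0:Int) ≤ q - 2) (by omega : (0:Int) ≤ -section_len)]
      · exact absurd h hpre
      · exact h
    have hmn := PySem.Int.mod_nonneg ((L.length : Int)) hs
    have hqs_le : q * section_len ≤ (L.length : Int) := by rw [← hqN] at hfm; omega
    rw [if_neg (by omega)]
    rw [isRepeatLoopA_eq L section_len hs (q - 2).toNat 1 le_rfl (by rw [← hq]; omega)]
    rw [← hq]
    congr 1
    simp only [decide_eq_decide]
    have hq0 : 0 ≤ q := by omega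
    have hfirst : PySem.List.slice L none (some section_len) = L.take section_len.toNat :=
      PySem.List.slice_to L (by omega)
    have hfirst0 : PySem.List.slice L (some 0) (some section_len) = L.take section_len.toNat := by
      rw [PySem.List.slice_zero_start, hfirst]
    have hprefix : PySem.List.slice L none (some (q * section_len)) =
        L.take (q * section_len).toNat := PySem.List.slice_to L (by positivity)
    have hs_le : section_len ≤ (L.length : Int) := by
      nlinarith [mul_nonneg (by omega : (0:Int) ≤ q - 1) (by omega : (0:Int) ≤ section_len)]
    have hflen : (L.take section_len.toNat).length = section_len.toNat := by
      simp [List.length_take]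
      omega
    have hmul : (q * section_len).toNat = q.toNat * section_len.toNat :=
      Int.toNat_mul hq0 (by omega)
    have hmullen : q.toNat * section_len.toNat ≤ L.length := by omega
    have hchar := take_mul_eq_flatten_replicate_iff section_len.toNat q.toNat L
      (L.take section_len.toNat) hflen hmullen
    rw [hfirst, hprefix, hmul]
    unfold PySem.List.pyRepeat
    rw [hchar]
    constructor
    · intro hall k hk
      rcases Nat.eq_zero_or_pos k with h0 | hpos
      · subst h0; simp
      · have hkq : ((k : Int)) < q := by omega
        have := hall (k : Int) (by exact_mod_cast hpos) hkq
        rw [slice_section L section_len (k : Int) hs (by positivity), hfirst0] at this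
        rw [← this]
        congr 2
        rw [Int.toNat_mul (by positivity) (by omega)]
        simp
    · intro hall n hn1 hn2
      rw [slice_section L section_len n hs (by omega), hfirst0]
      have hk : n.toNat < q.toNat := by omega
      have := hall n.toNat hk
      rw [← this]
      congr 2
      rw [Int.toNat_mul (by omega) (by omega)]

-- ===== VERDICT (by name: the statement is the Claim_ definition above) =====
theorem is_repeating_spec : Claim_equal_is_repeating := by
  intro number section_len _ hpre
  unfold Spec_is_repeating
  exact is_repeating_eq_alt number section_len hpre
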